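-- pv_equiv track=rewrite | github.com/tillahoffmann/collectiontools | src/collectiontools/__init__.py | transpose_to_dict
-- ===== SOURCE A (Python) =====
-- from typing import (
--     Any,
--     Callable,
--     Dict,
--     Iterable,
--     List,
--     Mapping,
--     Optional,
--     Sequence,
--     Union,
-- )
--
-- def transpose_to_dict(x: Iterable[Mapping]) -> Dict[Any, List]:
--     """
--     Transpose an iterable of mappings to a dictionary of lists.
--
--     Args:
--         x: Iterable to transpose.
--
--     Returns:
--         Dictionary of lists.
--
--     Examples:
--
--         >>> from collectiontools import transpose_to_dict
--         >>>
--         >>> transpose_to_dict([{"a": 1, "b": "hello"}, {"a": 2, "b": "hello"}])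
--         {'a': [1, 2], 'b': ['hello', 'hello']}
--     """
--     y = {}
--     keys = None
--     for i, z in enumerate(x):
--         if keys is None:
--             keys = set(z)
--         elif keys != set(z):
--             raise ValueError(
--                 f"Iterable has inconsistent keys at position {i}: expected {keys}, got "
--                 f"{set(keys)}."
--             )
--         for key, value in z.items():
--             y.setdefault(key, []).append(value)
--     return y
-- ===== SOURCE B (Python) =====
-- def transpose_to_dict(x):
--     items = list(x)
--     if not items:
--         return {}
--     keys = set(items[0])
--     for i, z in enumerate(items):
--         if set(z) != keys:
--             raise ValueError(
--                 f"Iterable has inconsistent keys at position {i}: expected {keys}, got "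
--                 f"{set(keys)}."
--             )
--     return {k: [z[k] for z in items] for k in items[0]}
-- ===== Notes on version B (the rewrite author's own statement) =====
-- stated objective: alternative
-- what changed: A builds the result in one pass with setdefault(...).append while discovering/checking keys on the fly; B first materializes the input, validates all key sets against the first mapping in one pass (raising A's identical ValueError at the same position), then transposes the other direction with a dict comprehension {k: [z[k] for z in items] for k in items[0]}, preserving the first mapping's key order.
import Mathlib
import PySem

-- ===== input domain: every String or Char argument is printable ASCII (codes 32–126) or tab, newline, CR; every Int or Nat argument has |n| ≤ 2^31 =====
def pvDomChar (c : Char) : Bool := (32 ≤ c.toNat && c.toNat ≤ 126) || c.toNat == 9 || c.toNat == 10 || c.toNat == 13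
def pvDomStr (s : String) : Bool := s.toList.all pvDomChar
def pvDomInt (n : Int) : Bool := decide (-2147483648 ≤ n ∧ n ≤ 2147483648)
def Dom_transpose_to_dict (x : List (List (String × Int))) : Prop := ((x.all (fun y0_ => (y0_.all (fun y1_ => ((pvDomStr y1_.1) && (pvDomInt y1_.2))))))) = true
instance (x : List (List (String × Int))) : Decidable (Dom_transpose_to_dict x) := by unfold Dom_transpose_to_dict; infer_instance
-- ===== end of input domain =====

-- B differs from A by decomposition: a validation pass first, then a key-major dict comprehension; same values, key order and error.
-- Each inner List (String × Int) encodes a Python dict (mapping), so its keys are unique; the equivalence is about return values only.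

-- ===== PORT A =====
-- y.setdefault(key, []).append(value), one (key, value) pair
def pvStepPair (y : PySem.Dict String (List Int)) (p : String × Int) : PySem.Dict String (List Int) :=
  y.modify p.1 [] fun l => l ++ [p.2]

-- the inner 'for key, value in z.items()' loop of A
def pvStepRow (y : PySem.Dict String (List Int)) (z : List (String × Int)) : PySem.Dict String (List Int) :=
  z.foldl pvStepPair y

-- one iteration of A's outer loop; state = none once the ValueError has been raised
-- (the enumerate index only feeds the error message, so it is not carried)
def pvLoopA (st : Option (PySem.Dict String (List Int) × Option (PySem.Set String)))
    (z : List (String × Int)) : Option (PySem.Dict String (List Int) × Option (PySem.Set String)) :=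
  match st with
  | none => none
  | some (y, none) => some (pvStepRow y z, some (PySem.Set.ofList (z.map Prod.fst)))
  | some (y, some ks) =>
      if PySem.Set.equal ks (PySem.Set.ofList (z.map Prod.fst)) then some (pvStepRow y z, some ks)
      else none

def transpose_to_dict (x : List (List (String × Int))) : List (String × List Int) :=
  match x.foldl pvLoopA (some (PySem.Dict.empty, none)) with
  | some (y, _) => y.items
  | none => []  -- unreachable under Pre_: A raised ValueError

-- ===== PORT B =====
def transpose_to_dict_alt (x : List (List (String × Int))) : List (String × List Int) :=
  match x with
  | [] => []
  | z0 :: _ =>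
    -- validation pass: every row's key set must equal set(items[0])
    if x.all (fun z => PySem.Set.equal (PySem.Set.ofList (z.map Prod.fst))
                        (PySem.Set.ofList (z0.map Prod.fst))) then
      -- {k: [z[k] for z in items] for k in items[0]}
      (z0.map Prod.fst).map (fun k => (k, x.map (fun z => (PySem.Dict.mk z).getD k 0)))
    else []  -- unreachable under Pre_: B raised ValueError

-- ===== PRECONDITION & SPEC =====
-- Pre_ holds exactly when A returns: every row's key set equals the first row's (else A raises
-- ValueError, B raises the identical one). The Nodup conjunct excludes no Python input: each inner
-- list encodes a Python dict, whose keys are necessarily distinct.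
def Pre_transpose_to_dict (x : List (List (String × Int))) : Prop :=
  (x.all (fun z => decide (z.map Prod.fst).Nodup &&
     PySem.Set.equal (PySem.Set.ofList ((x.headD []).map Prod.fst))
                     (PySem.Set.ofList (z.map Prod.fst)))) = true
instance (x : List (List (String × Int))) : Decidable (Pre_transpose_to_dict x) := by
  unfold Pre_transpose_to_dict; infer_instance

def pvWitness_transpose_to_dict : (List (List (String × Int))) :=
  [[("a", 1), ("b", 2)], [("b", 3), ("a", 4)]]

def Spec_transpose_to_dict (x : List (List (String × Int))) (out : List (String × List Int)) : Prop := out = transpose_to_dict_alt x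
instance (x : List (List (String × Int))) (out : List (String × List Int)) : Decidable (Spec_transpose_to_dict x out) := by unfold Spec_transpose_to_dict; infer_instance

-- ===== CLAIM (what is proved, stated in full; the proofs are below) =====
def Claim_equal_transpose_to_dict : Prop := ∀ (x : List (List (String × Int))), Dom_transpose_to_dict x → Pre_transpose_to_dict x → Spec_transpose_to_dict x (transpose_to_dict x)

-- ===== LEMMAS AND PROOFS =====

-- an association list with distinct keys: filtering for key k yields exactly the looked-up value
theorem pv_filter_lookup (z : List (String × Int)) (k : String)
    (hnd : (z.map Prod.fst).Nodup) (hk : k ∈ z.map Prod.fst) :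
    List.map Prod.snd (List.filter (fun p => p.1 == k) z) = [(PySem.Dict.mk z).getD k 0] := by
  induction z with
  | nil => simp at hk
  | cons a z ih =>
    simp only [List.map_cons, List.nodup_cons] at hnd hk
    by_cases hak : a.1 = k
    · have hnot : List.filter (fun p => p.1 == k) z = [] := by
        rw [List.filter_eq_nil_iff]
        intro p hp
        simp only [beq_iff_eq]
        intro he
        exact hnd.1 (hak ▸ he ▸ List.mem_map_of_mem (f := Prod.fst) hp)
      simp [hnot, hak, PySem.Dict.getD, PySem.Dict.get?, List.find?]
    · rcases List.mem_cons.mp hk with h | h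
      · exact absurd h.symm hak
      · simp [show (a.1 == k) = false by simp [hak], ih hnd.2 h,
          PySem.Dict.getD, PySem.Dict.get?, List.find?]

-- A's inner loop is exactly the foldl shape of getD_foldl_modify_append
theorem pv_stepRow_getD (y : PySem.Dict String (List Int)) (z : List (String × Int)) (k : String) :
    (pvStepRow y z).getD k [] =
      y.getD k [] ++ List.map Prod.snd (List.filter (fun p => p.1 == k) z) := by
  simpa [pvStepRow, pvStepPair] using PySem.Dict.getD_foldl_modify_append z y k

theorem pv_stepRow_keys (y : PySem.Dict String (List Int)) (z : List (String × Int)) :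
    (pvStepRow y z).keys = PySem.Set.update y.keys (z.map Prod.fst) := by
  simpa [pvStepRow, pvStepPair] using
    PySem.Dict.keys_foldl_modify_key z Prod.fst [] (fun _ p => (· ++ [p.2])) y

theorem pv_update_of_subset (xs : List String) (s : PySem.Set String)
    (h : ∀ a ∈ xs, a ∈ s) : PySem.Set.update s xs = s := by
  induction xs generalizing s with
  | nil => exact PySem.Set.update_nil s
  | cons a xs ih =>
    rw [PySem.Set.update_cons, PySem.Set.add_of_mem (h a (by simp))]
    exact ih s fun b hb => h b (by simp [hb])

-- value column accumulated over a list of rows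
theorem pv_fold_getD (rows : List (List (String × Int))) (k : String)
    (h : ∀ z ∈ rows, (z.map Prod.fst).Nodup ∧ k ∈ z.map Prod.fst) :
    ∀ d : PySem.Dict String (List Int),
      (rows.foldl pvStepRow d).getD k [] =
        d.getD k [] ++ rows.map (fun z => (PySem.Dict.mk z).getD k 0) := by
  induction rows with
  | nil => intro d; simp
  | cons z rows ih =>
    intro d
    have hz := h z (by simp)
    rw [List.foldl_cons, ih (fun w hw => h w (by simp [hw])), pv_stepRow_getD,
      pv_filter_lookup z k hz.1 hz.2]
    simp

-- keys are preserved once every row's keys lie inside them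
theorem pv_fold_keys (rows : List (List (String × Int))) (K : List String)
    (h : ∀ z ∈ rows, ∀ a ∈ z.map Prod.fst, a ∈ K) :
    ∀ d : PySem.Dict String (List Int), d.keys = K → (rows.foldl pvStepRow d).keys = K := by
  induction rows with
  | nil => intro d hd; simpa using hd
  | cons z rows ih =>
    intro d hd
    rw [List.foldl_cons]
    refine ih (fun w hw => h w (by simp [hw])) _ ?_
    rw [pv_stepRow_keys, hd, pv_update_of_subset _ _ (h z (by simp))]

-- A's outer loop never raises when every row's key set equals ks
theorem pv_loopA_run (rows : List (List (String × Int))) (ks : PySem.Set String)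
    (h : ∀ z ∈ rows, PySem.Set.equal ks (PySem.Set.ofList (z.map Prod.fst)) = true) :
    ∀ y : PySem.Dict String (List Int),
      rows.foldl pvLoopA (some (y, some ks)) = some (rows.foldl pvStepRow y, some ks) := by
  induction rows with
  | nil => intro y; rfl
  | cons z rows ih =>
    intro y
    rw [List.foldl_cons, List.foldl_cons]
    have hz := h z (by simp)
    show rows.foldl pvLoopA (pvLoopA (some (y, some ks)) z) = _
    rw [show pvLoopA (some (y, some ks)) z = some (pvStepRow y z, some ks) by
      simp [pvLoopA, hz]]
    exact ih (fun w hw => h w (by simp [hw])) _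

-- ===== VERDICT (by name: the statement is the Claim_ definition above) =====
theorem transpose_to_dict_spec : Claim_equal_transpose_to_dict := by
  intro x _ hpre
  unfold Spec_transpose_to_dict
  match x with
  | [] => rfl
  | z0 :: rest =>
    unfold Pre_transpose_to_dict at hpre
    simp only [List.all_eq_true, Bool.and_eq_true, decide_eq_true_eq, List.headD_cons] at hpre
    set hk : List String := z0.map Prod.fst with hhk
    have hnd0 : hk.Nodup := (hpre z0 (by simp)).1
    have hofl : PySem.Set.ofList hk = hk := PySem.Set.ofList_eq_self_of_nodup hk hnd0
    -- membership form of the key-set condition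
    have hmem : ∀ z ∈ z0 :: rest, ∀ a : String, (a ∈ z.map Prod.fst ↔ a ∈ hk) := by
      intro z hz a
      have := (PySem.Set.equal_iff _ _).mp (hpre z hz).2 a
      rw [PySem.Set.mem_ofList, PySem.Set.mem_ofList] at this
      exact this.symm
    -- A's side: the loop never raises and computes the plain dict fold
    have hA : transpose_to_dict (z0 :: rest) =
        ((z0 :: rest).foldl pvStepRow PySem.Dict.empty).items := by
      unfold transpose_to_dict
      rw [List.foldl_cons, show pvLoopA (some (PySem.Dict.empty, none)) z0 =
          some (pvStepRow PySem.Dict.empty z0, some (PySem.Set.ofList hk)) from rfl,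
        pv_loopA_run rest (PySem.Set.ofList hk) (fun z hz => (hpre z (by simp [hz])).2) _]
      rw [List.foldl_cons]
    -- the dict's key list is exactly hk
    have hkeys : ((z0 :: rest).foldl pvStepRow PySem.Dict.empty).keys = hk := by
      rw [List.foldl_cons]
      refine pv_fold_keys rest hk (fun z hz a ha => (hmem z (by simp [hz]) a).mp ha) _ ?_
      rw [pv_stepRow_keys, PySem.Dict.keys_empty, PySem.Set.update_nil_left, hofl]
    -- the dict's columns
    have hcol : ∀ k ∈ hk, ((z0 :: rest).foldl pvStepRow PySem.Dict.empty).getD k [] =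
        (z0 :: rest).map (fun z => (PySem.Dict.mk z).getD k 0) := by
      intro k hkmem
      rw [pv_fold_getD (z0 :: rest) k
        (fun z hz => ⟨(hpre z hz).1, (hmem z hz k).mpr hkmem⟩) PySem.Dict.empty,
        PySem.Dict.getD_empty]
      rfl
    -- assemble
    rw [hA, PySem.Dict.items_eq_map_keys _ (hkeys ▸ hnd0) [], hkeys]
    have hcond : ((z0 :: rest).all fun z =>
        PySem.Set.equal (PySem.Set.ofList (z.map Prod.fst)) (PySem.Set.ofList (z0.map Prod.fst))) = true := by
      simp only [List.all_eq_true]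
      intro z hz
      rw [PySem.Set.equal_iff]
      intro a
      rw [PySem.Set.mem_ofList, PySem.Set.mem_ofList]
      exact hmem z hz a
    rw [show transpose_to_dict_alt (z0 :: rest) =
        (if ((z0 :: rest).all fun z =>
            PySem.Set.equal (PySem.Set.ofList (z.map Prod.fst)) (PySem.Set.ofList (z0.map Prod.fst))) = true then
          (z0.map Prod.fst).map (fun k => (k, (z0 :: rest).map (fun z => (PySem.Dict.mk z).getD k 0)))
        else []) from rfl, if_pos hcond]
    exact List.map_congr_left fun k hkmem => by rw [hcol k hkmem]
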